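-- pv_equiv track=rewrite | github.com/PgmJun/CodingTest | 프로그래머스/unrated/181859. 배열 만들기 6/배열 만들기 6.py | solution
-- ===== SOURCE A (Python) =====
-- def solution(arr):
--     stk = []
--     i = 0
--
--     for i in range(len(arr)):
--         if len(stk) == 0:
--             stk.append(arr[i])
--         elif len(stk) > 0:
--             if stk[-1] == arr[i]:
--                 stk = stk[:-1]
--             elif stk[-1] != arr[i]:
--                 stk.append(arr[i])
--         i+=1
--     if len(stk) == 0:
--         stk.append(-1)
--     return stk
-- ===== SOURCE B (Python) =====
-- def solution(arr):
--     def cancel_first(xs):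
--         # find the first adjacent equal pair and delete it
--         for i in range(len(xs) - 1):
--             if xs[i] == xs[i + 1]:
--                 return xs[:i] + xs[i + 2:]
--         return None
--
--     res = list(arr)
--     while True:
--         nxt = cancel_first(res)
--         if nxt is None:
--             break
--         res = nxt
--     return res if res else [-1]
-- ===== Notes on version B (the rewrite author's own statement) =====
-- stated objective: alternative
-- what changed: Replaces the single-pass stack (push/pop on last element) by a repeated-scan reduction that deletes the first adjacent equal pair until none remains; confluence of pairwise cancellation makes the results identical.
import Mathlib
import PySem

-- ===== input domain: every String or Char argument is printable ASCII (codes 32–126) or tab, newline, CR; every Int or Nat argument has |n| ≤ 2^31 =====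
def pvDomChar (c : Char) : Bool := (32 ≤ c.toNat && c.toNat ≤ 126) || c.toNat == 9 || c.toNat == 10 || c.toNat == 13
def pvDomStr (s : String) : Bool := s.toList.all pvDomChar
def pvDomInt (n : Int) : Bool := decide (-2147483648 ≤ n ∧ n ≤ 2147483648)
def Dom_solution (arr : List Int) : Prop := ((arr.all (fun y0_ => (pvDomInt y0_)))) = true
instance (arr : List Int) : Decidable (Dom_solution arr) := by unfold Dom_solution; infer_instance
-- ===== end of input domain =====

-- B replaces A's single-pass stack by a repeated-scan cancellation of the first
-- adjacent equal pair (alternative decomposition; the results coincide).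

-- ===== PORT A =====
-- single-pass stack; 'for i in range(len(arr))' with arr[i] (i always in range, so the default 0 is unreachable)
def solution (arr : List Int) : List Int :=
  let stk :=
    (PySem.List.pyRange 0 (PySem.List.len arr)).foldl
      (fun stk i =>
        let a := PySem.List.pyGetD arr i 0
        if stk.length = 0 then stk ++ [a]
        else if stk.length > 0 then
          if PySem.List.pyGetD stk (-1) 0 = a then PySem.List.slice stk none (some (-1))
          else if PySem.List.pyGetD stk (-1) 0 ≠ a then stk ++ [a]
          else stk
        else stk) []
  if stk.length = 0 then stk ++ [-1] else stk

-- ===== PORT B =====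
-- scan for the first i with xs[i] = xs[i+1]; if found, return xs[:i] ++ xs[i+2:], else None
def cancelFirst : List Int → Option (List Int)
  | a :: b :: t => if a = b then some t else (cancelFirst (b :: t)).map (a :: ·)
  | _ => none

theorem cancelFirst_length : ∀ (l l' : List Int), cancelFirst l = some l' → l'.length < l.length
  | a :: b :: t, l', h => by
    by_cases hab : a = b
    · simp [cancelFirst, hab] at h; simp [← h]
    · simp [cancelFirst, hab] at h
      obtain ⟨t', ht', rfl⟩ := h
      have := cancelFirst_length (b :: t) t' ht'
      simp at this ⊢; omega

-- the 'while True' loop: repeat until no adjacent equal pair remains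
def reduceFull (l : List Int) : List Int :=
  match h : cancelFirst l with
  | some l' => reduceFull l'
  | none => l
termination_by l.length
decreasing_by exact cancelFirst_length _ _ h

def solution_alt (arr : List Int) : List Int :=
  let res := reduceFull arr
  if res = [] then [-1] else res

-- ===== PRECONDITION & SPEC =====
def Spec_solution (arr : List Int) (out : List Int) : Prop := out = solution_alt arr
instance (arr : List Int) (out : List Int) : Decidable (Spec_solution arr out) := by unfold Spec_solution; infer_instance

-- ===== CLAIM (what is proved, stated in full; the proofs are below) =====
def Claim_equal_solution : Prop := ∀ (arr : List Int), Dom_solution arr → Spec_solution arr (solution arr)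

-- ===== LEMMAS AND PROOFS =====

-- clean form of A's loop step
def gstep (stk : List Int) (a : Int) : List Int :=
  if stk = [] then [a]
  else if stk.getLast? = some a then stk.dropLast
  else stk ++ [a]

theorem gstep_nil (a : Int) : gstep [] a = [a] := rfl

theorem gstep_last_eq (q : List Int) (x : Int) : gstep (q ++ [x]) x = q := by
  unfold gstep
  rw [if_neg (by simp), if_pos (by simp), List.dropLast_concat]

theorem gstep_last_ne (q : List Int) {x a : Int} (hxa : x ≠ a) :
    gstep (q ++ [x]) a = q ++ [x] ++ [a] := by
  unfold gstep
  rw [if_neg (by simp), if_neg (by simp [hxa])]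

theorem astep_eq_gstep (stk : List Int) (a : Int) :
    (if stk.length = 0 then stk ++ [a]
     else if stk.length > 0 then
       if PySem.List.pyGetD stk (-1) 0 = a then PySem.List.slice stk none (some (-1))
       else if PySem.List.pyGetD stk (-1) 0 ≠ a then stk ++ [a]
       else stk
     else stk) = gstep stk a := by
  rcases List.eq_nil_or_concat stk with rfl | ⟨q, x, rfl⟩
  · rfl
  · simp only [List.concat_eq_append]
    rw [if_neg (by simp), if_pos (by simp),
        PySem.List.pyGetD_neg_one_append_singleton]
    have hs : PySem.List.slice (q ++ [x]) none (some (-1)) = q := by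
      have h1 := PySem.List.slice_to_neg_natCast (q ++ [x]) 1 (by omega)
      norm_num at h1
      rw [h1]
    by_cases hxa : x = a
    · subst hxa
      rw [if_pos rfl, hs, gstep_last_eq]
    · rw [if_neg hxa, if_pos hxa, gstep_last_ne q hxa]

def Irred (l : List Int) : Prop := List.IsChain (· ≠ ·) l

theorem irred_gstep {stk : List Int} (h : Irred stk) (a : Int) : Irred (gstep stk a) := by
  rcases List.eq_nil_or_concat stk with rfl | ⟨q, x, rfl⟩
  · simp [gstep_nil, Irred]
  · simp only [List.concat_eq_append] at *
    by_cases hxa : x = a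
    · subst hxa
      rw [gstep_last_eq]
      exact (List.isChain_append.mp h).1
    · rw [gstep_last_ne q hxa]
      unfold Irred at *
      rw [List.isChain_append]
      exact ⟨h, by simp, by simpa using hxa⟩

theorem gstep_gstep {stk : List Int} (h : Irred stk) (a : Int) :
    gstep (gstep stk a) a = stk := by
  rcases List.eq_nil_or_concat stk with rfl | ⟨q, x, rfl⟩
  · rw [gstep_nil]
    exact gstep_last_eq [] a
  · simp only [List.concat_eq_append] at *
    by_cases hxa : x = a
    · subst hxa
      rw [gstep_last_eq]
      rcases List.eq_nil_or_concat q with rfl | ⟨q', y, rfl⟩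
      · rfl
      · simp only [List.concat_eq_append] at *
        have hyx : y ≠ x := by
          unfold Irred at h
          rw [List.isChain_append] at h
          simpa using h.2.2 y (by simp) x
        rw [gstep_last_ne q' hyx]
    · rw [gstep_last_ne q hxa]
      exact gstep_last_eq (q ++ [x]) a

theorem foldl_gstep_cancel : ∀ (l l' : List Int) (s : List Int), Irred s →
    cancelFirst l = some l' → l.foldl gstep s = l'.foldl gstep s
  | a :: b :: t, l', s, hs, h => by
    by_cases hab : a = b
    · simp [cancelFirst, hab] at h
      subst h hab
      simp only [List.foldl_cons]
      rw [gstep_gstep hs]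
    · simp [cancelFirst, hab] at h
      obtain ⟨t', ht', rfl⟩ := h
      simp only [List.foldl_cons]
      exact foldl_gstep_cancel (b :: t) t' (gstep s a) (irred_gstep hs a) ht'

theorem cancelFirst_none : ∀ {l : List Int}, cancelFirst l = none → Irred l
  | [], _ => by simp [Irred]
  | [a], _ => by simp [Irred]
  | a :: b :: t, h => by
    by_cases hab : a = b
    · simp [cancelFirst, hab] at h
    · simp [cancelFirst, hab] at h
      have := cancelFirst_none h
      unfold Irred at *
      exact List.isChain_cons_cons.mpr ⟨hab, this⟩

theorem foldl_gstep_irred : ∀ (l s : List Int), Irred (s ++ l) → l.foldl gstep s = s ++ l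
  | [], s, _ => by simp
  | a :: t, s, h => by
    have hstep : gstep s a = s ++ [a] := by
      rcases List.eq_nil_or_concat s with rfl | ⟨q, x, rfl⟩
      · simp [gstep_nil]
      · simp only [List.concat_eq_append] at *
        have hxa : x ≠ a := by
          unfold Irred at h
          rw [List.isChain_append] at h
          simpa using h.2.2 x (by simp) a
        rw [gstep_last_ne q hxa]
    simp only [List.foldl_cons, hstep]
    rw [foldl_gstep_irred t (s ++ [a]) (by simpa using h)]
    simp

theorem reduceFull_some {l l' : List Int} (h : cancelFirst l = some l') :
    reduceFull l = reduceFull l' := by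
  rw [reduceFull]
  split <;> simp_all

theorem reduceFull_none {l : List Int} (h : cancelFirst l = none) :
    reduceFull l = l := by
  rw [reduceFull]
  split <;> simp_all

theorem foldl_gstep_reduceFull (l : List Int) : l.foldl gstep [] = reduceFull l := by
  induction l using reduceFull.induct with
  | case1 l l' h ih =>
    rw [foldl_gstep_cancel l l' [] (by simp [Irred]) h, ih, reduceFull_some h]
  | case2 l h =>
    have := cancelFirst_none h
    rw [foldl_gstep_irred l [] (by simpa using this), reduceFull_none h]
    simp

-- ===== VERDICT (by name: the statement is the Claim_ definition above) =====
theorem solution_spec : Claim_equal_solution := by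
  intro arr _
  unfold Spec_solution solution solution_alt
  rw [PySem.List.foldl_congr_mem _ _ (fun acc j => gstep acc (PySem.List.pyGetD arr j 0)) _
        (fun acc x _ => astep_eq_gstep acc (PySem.List.pyGetD arr x 0)),
      PySem.List.foldl_pyRange_pyGetD arr 0 gstep [] (le_refl 0)]
  simp only [Int.toNat_zero, List.drop_zero]
  rw [foldl_gstep_reduceFull]
  by_cases hn : reduceFull arr = [] <;> simp [hn]
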